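-- pv_equiv track=rewrite | github.com/phenobarbital/navigator | .agent/skills/reverse-engineering-api/scripts/har_filter.py | should_skip_domain
-- ===== SOURCE A (Python) =====
-- SKIP_DOMAIN_PATTERNS = [
--     # Analytics
--     'google-analytics.com',
--     'analytics.google.com',
--     'googletagmanager.com',
--     'doubleclick.net',
--     'facebook.net',
--     'connect.facebook.net',
--     'mixpanel.com',
--     'segment.com',
--     'segment.io',
--     'amplitude.com',
--     'hotjar.com',
--     'fullstory.com',
--     'heap.io',
--     'clarity.ms',
--     # Ads
--     'googlesyndication.com',
--     'adservice.google.com',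
--     'advertising.com',
--     # CDN patterns
--     'cloudfront.net',
--     'fastly.net',
--     'akamai.net',
--     'akamaihd.net',
--     'cdn.jsdelivr.net',
--     'unpkg.com',
--     'cdnjs.cloudflare.com',
--     # Other tracking
--     'bugsnag.com',
--     'sentry.io',
--     'newrelic.com',
-- ]
--
-- def should_skip_domain(hostname: str) -> bool:
--     """
--     Check if a domain should be skipped.
--
--     Args:
--         hostname: Hostname from URL
--
--     Returns:
--         True if domain should be skipped
--     """
--     if not hostname:
--         return False
--
--     hostname_lower = hostname.lower()
--
--     for pattern in SKIP_DOMAIN_PATTERNS: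
--         if pattern in hostname_lower:
--             return True
--
--     # Skip common CDN patterns like cdn.*, static.*, assets.*
--     if hostname_lower.startswith(('cdn.', 'static.', 'assets.', 'media.')):
--         return True
--
--     return False
-- ===== SOURCE B (Python) =====
-- SKIP_DOMAIN_PATTERNS = [
--     'google-analytics.com',
--     'analytics.google.com',
--     'googletagmanager.com',
--     'doubleclick.net',
--     'facebook.net',
--     'connect.facebook.net',
--     'mixpanel.com',
--     'segment.com',
--     'segment.io',
--     'amplitude.com',
--     'hotjar.com',
--     'fullstory.com',
--     'heap.io',
--     'clarity.ms',
--     'googlesyndication.com',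
--     'adservice.google.com',
--     'advertising.com',
--     'cloudfront.net',
--     'fastly.net',
--     'akamai.net',
--     'akamaihd.net',
--     'cdn.jsdelivr.net',
--     'unpkg.com',
--     'cdnjs.cloudflare.com',
--     'bugsnag.com',
--     'sentry.io',
--     'newrelic.com',
-- ]
--
-- # Index built once: patterns grouped by their first character, so the scan over
-- # the hostname only compares patterns that can possibly start at each position.
-- _BY_FIRST = {}
-- for _p in SKIP_DOMAIN_PATTERNS:
--     _BY_FIRST.setdefault(_p[0], []).append(_p)
--
-- _CDN_PREFIXES = ('cdn.', 'static.', 'assets.', 'media.')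
--
--
-- def should_skip_domain(hostname: str) -> bool:
--     if not hostname:
--         return False
--
--     h = hostname.lower()
--
--     if h.startswith(_CDN_PREFIXES):
--         return True
--
--     # Single text-driven pass: at each position, try only patterns whose
--     # first character matches the character there.
--     for i, ch in enumerate(h):
--         for p in _BY_FIRST.get(ch, ()):
--             if h.startswith(p, i):
--                 return True
--
--     return False
-- ===== Notes on version B (the rewrite author's own statement) =====
-- stated objective: alternative
-- what changed: Replaces the pattern-driven loop (one 'in'-substring scan of the hostname per pattern) with a single text-driven scan over hostname positions, using a first-character index built once at module level so only patterns that can start at a position are tried.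
import Mathlib
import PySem

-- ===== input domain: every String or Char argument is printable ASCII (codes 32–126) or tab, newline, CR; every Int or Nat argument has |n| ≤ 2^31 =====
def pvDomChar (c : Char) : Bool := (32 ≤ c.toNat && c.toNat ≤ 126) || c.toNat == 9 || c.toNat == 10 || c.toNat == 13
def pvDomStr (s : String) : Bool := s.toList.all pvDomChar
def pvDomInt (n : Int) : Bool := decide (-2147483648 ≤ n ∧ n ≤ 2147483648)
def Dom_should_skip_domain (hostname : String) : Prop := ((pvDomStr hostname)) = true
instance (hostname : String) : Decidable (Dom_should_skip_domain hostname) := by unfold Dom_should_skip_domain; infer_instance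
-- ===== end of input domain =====

-- B replaces A's pattern-driven substring loop by one text-driven scan with a
-- first-character index of the patterns, built once (objective: alternative).

-- ===== PORT A =====
def SKIP_DOMAIN_PATTERNS : List String := [
  "google-analytics.com", "analytics.google.com", "googletagmanager.com",
  "doubleclick.net", "facebook.net", "connect.facebook.net", "mixpanel.com",
  "segment.com", "segment.io", "amplitude.com", "hotjar.com", "fullstory.com",
  "heap.io", "clarity.ms", "googlesyndication.com", "adservice.google.com",
  "advertising.com", "cloudfront.net", "fastly.net", "akamai.net",
  "akamaihd.net", "cdn.jsdelivr.net", "unpkg.com", "cdnjs.cloudflare.com",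
  "bugsnag.com", "sentry.io", "newrelic.com"]

def should_skip_domain (hostname : String) : Bool :=
  if hostname == "" then false
  else
    let hostname_lower := PySem.Str.lower hostname
    -- for pattern in SKIP_DOMAIN_PATTERNS: if pattern in hostname_lower: return True
    if SKIP_DOMAIN_PATTERNS.any (fun pattern => PySem.Str.isIn pattern hostname_lower) then true
    -- hostname_lower.startswith(('cdn.', 'static.', 'assets.', 'media.'))
    else if PySem.Str.startswith hostname_lower "cdn." || PySem.Str.startswith hostname_lower "static."
         || PySem.Str.startswith hostname_lower "assets." || PySem.Str.startswith hostname_lower "media." then true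
    else false

-- ===== PORT B =====
-- p[0] of a pattern (all patterns are nonempty)
def pyFirstChar (p : String) : Char := p.toList.headD ' '

-- _BY_FIRST: patterns grouped by first character (setdefault(..., []).append(p))
def byFirst : PySem.Dict Char (List String) :=
  SKIP_DOMAIN_PATTERNS.foldl
    (fun d p => d.insert (pyFirstChar p) (d.getD (pyFirstChar p) [] ++ [p]))
    PySem.Dict.empty

def CDN_PREFIXES : List String := ["cdn.", "static.", "assets.", "media."]

def should_skip_domain_alt (hostname : String) : Bool :=
  if hostname == "" then false
  else
    let h := PySem.Str.lower hostname
    if CDN_PREFIXES.any (fun pre => PySem.Str.startswith h pre) then true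
    else
      -- for i, ch in enumerate(h): for p in _BY_FIRST.get(ch, ()): if h.startswith(p, i): return True
      (PySem.List.enumerate h.toList 0).any (fun ic =>
        (byFirst.getD ic.2 []).any (fun p =>
          PySem.Chars.startswith (h.toList.drop ic.1.toNat) p.toList))

-- ===== PRECONDITION & SPEC =====
def Spec_should_skip_domain (hostname : String) (out : Bool) : Prop := out = should_skip_domain_alt hostname
instance (hostname : String) (out : Bool) : Decidable (Spec_should_skip_domain hostname out) := by unfold Spec_should_skip_domain; infer_instance

-- ===== CLAIM (what is proved, stated in full; the proofs are below) =====
def Claim_equal_should_skip_domain : Prop := ∀ (hostname : String), Dom_should_skip_domain hostname → Spec_should_skip_domain hostname (should_skip_domain hostname)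

-- ===== LEMMAS AND PROOFS =====

lemma patterns_ne_nil : ∀ p ∈ SKIP_DOMAIN_PATTERNS, p.toList ≠ [] := by decide

lemma foldl_group_getD (l : List String) (d : PySem.Dict Char (List String)) (c : Char) :
    (l.foldl (fun d p => d.insert (pyFirstChar p) (d.getD (pyFirstChar p) [] ++ [p])) d).getD c []
      = d.getD c [] ++ l.filter (fun p => pyFirstChar p == c) := by
  induction l generalizing d with
  | nil => simp
  | cons p l ih =>
    simp only [List.foldl_cons, List.filter_cons, ih, PySem.Dict.getD_insert]
    by_cases h : pyFirstChar p = c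
    · simp [h]
    · simp [h, Ne.symm h]

lemma mem_byFirst (c : Char) (p : String) :
    p ∈ byFirst.getD c [] ↔ p ∈ SKIP_DOMAIN_PATTERNS ∧ pyFirstChar p = c := by
  simp [byFirst, foldl_group_getD, List.mem_filter]

-- the text-driven indexed scan finds exactly the patterns occurring as substrings
lemma scan_iff (L : List Char) :
    ((PySem.List.enumerate L 0).any (fun ic =>
        (byFirst.getD ic.2 []).any (fun p =>
          PySem.Chars.startswith (L.drop ic.1.toNat) p.toList)) = true)
      ↔ ∃ p ∈ SKIP_DOMAIN_PATTERNS, p.toList <:+: L := by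
  simp only [List.any_eq_true, PySem.List.mem_enumerate_iff, PySem.Chars.startswith_iff,
    mem_byFirst]
  constructor
  · rintro ⟨ic, ⟨k, hk, rfl⟩, p, ⟨hpP, _⟩, hpre⟩
    exact ⟨p, hpP, hpre.isInfix.trans (List.drop_suffix _ _).isInfix⟩
  · rintro ⟨p, hpP, hinf⟩
    have hIn : PySem.Chars.isIn p.toList L = true := (PySem.Chars.isIn_iff_infix _ _).mpr hinf
    obtain ⟨j, hpre⟩ := (PySem.Chars.exists_prefix_drop_iff_isIn _ _).mpr hIn
    obtain ⟨t, ht⟩ := hpre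
    have hne := patterns_ne_nil p hpP
    cases hp : p.toList with
    | nil => exact absurd hp hne
    | cons a rest =>
      rw [hp] at ht
      have hdrop : L.drop j = a :: (rest ++ t) := by rw [← ht]; simp
      have hjlt : j < L.length := by
        by_contra hge
        have : L.drop j = [] := List.drop_eq_nil_of_le (le_of_not_gt hge)
        simp [this] at hdrop
      have hLj : L[j] = a := by
        have h0 : (L.drop j)[0]'(by simp [hdrop]) = L[j] := by
          simp [List.getElem_drop]
        simp [hdrop] at h0
        exact h0.symm
      refine ⟨((0 : Int) + (j : Int), L[j]), ⟨j, hjlt, rfl⟩, p, ⟨hpP, ?_⟩, ?_⟩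
      · simp [pyFirstChar, hp, hLj]
      · have : ((0 : Int) + (j : Int)).toNat = j := by omega
        rw [this, hp]
        exact ⟨t, ht⟩

lemma patterns_any_iff (h : String) :
    (SKIP_DOMAIN_PATTERNS.any (fun p => PySem.Str.isIn p h) = true)
      ↔ ∃ p ∈ SKIP_DOMAIN_PATTERNS, p.toList <:+: h.toList := by
  simp [List.any_eq_true, PySem.Chars.isIn_iff_infix]

-- ===== VERDICT (by name: the statement is the Claim_ definition above) =====
theorem should_skip_domain_spec : Claim_equal_should_skip_domain := by
  intro hostname _
  unfold Spec_should_skip_domain should_skip_domain should_skip_domain_alt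
  by_cases he : hostname == ""
  · simp [he]
  · simp only [he, if_false, Bool.false_eq_true]
    have hpre :
        (PySem.Str.startswith (PySem.Str.lower hostname) "cdn." || PySem.Str.startswith (PySem.Str.lower hostname) "static."
          || PySem.Str.startswith (PySem.Str.lower hostname) "assets." || PySem.Str.startswith (PySem.Str.lower hostname) "media.")
        = CDN_PREFIXES.any (fun pre => PySem.Str.startswith (PySem.Str.lower hostname) pre) := by
      simp [CDN_PREFIXES, Bool.or_assoc]
    have hpat :
        SKIP_DOMAIN_PATTERNS.any (fun p => PySem.Str.isIn p (PySem.Str.lower hostname))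
        = (PySem.List.enumerate (PySem.Str.lower hostname).toList 0).any (fun ic =>
            (byFirst.getD ic.2 []).any (fun p =>
              PySem.Chars.startswith ((PySem.Str.lower hostname).toList.drop ic.1.toNat) p.toList)) := by
      rw [Bool.eq_iff_iff]
      rw [patterns_any_iff, scan_iff]
    rw [hpat, hpre]
    cases (CDN_PREFIXES.any (fun pre => PySem.Str.startswith (PySem.Str.lower hostname) pre)) <;>
      cases ((PySem.List.enumerate (PySem.Str.lower hostname).toList 0).any (fun ic =>
        (byFirst.getD ic.2 []).any (fun p =>
          PySem.Chars.startswith ((PySem.Str.lower hostname).toList.drop ic.1.toNat) p.toList))) <;> simp
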